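-- pv_equiv track=rewrite | github.com/Anu5156/Prompt_Wars | scheduler.py | split_across_days
-- ===== SOURCE A (Python) =====
-- from typing import Dict, List, Optional
--
-- def split_across_days(schedule: Dict[str, int], days: int) -> Optional[Dict]:
--     """
--     Splits study plan across multiple days.
--
--     Args:
--         schedule (dict): Subject → allocated minutes
--         days (int): Number of days
--
--     Returns:
--         dict or None: Day-wise distribution
--     """
--
--     if days == 0:
--         return None
--
--     day_plan = {}
--     total = sum(schedule.values())
--     per_day = max(1, total // days)
--
--     items = list(schedule.items())
--
--     for day in range(1, days + 1):
--
--         if day == 1: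
--             label = "🧠 Deep Focus"
--         elif day == days:
--             label = "🔁 Revision Focus"
--         else:
--             label = "⚖️ Balanced Learning"
--
--         key = f"Day {day} ({label})"
--         day_plan[key] = {}
--
--         remaining = per_day
--
--         for i in range(len(items)):
--             subject, time = items[i]
--
--             if time <= 0:
--                 continue
--
--             portion = min(time, remaining)
--
--             day_plan[key][subject] = portion
--             items[i] = (subject, time - portion)
--
--             remaining -= portion
--
--             if remaining <= 0:
--                 break
--
--     return day_plan
-- ===== SOURCE B (Python) =====
-- def split_across_days(schedule, days):
--     """Subject-major re-implementation: each positive-minute subject occupies an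
--     interval [a, a+t) of the concatenated study stream; day d (1-based) owns the
--     window [(d-1)*per_day, d*per_day), so every subject is written directly into
--     exactly the days it overlaps (O(days + subjects) work in total)."""
--     if days == 0:
--         return None
--
--     total = sum(schedule.values())
--     per_day = max(1, total // days)
--     n = days if days > 0 else 0
--
--     allocs = [{} for _ in range(n)]
--     a = 0
--     for subject, t in schedule.items():
--         if t <= 0:
--             continue
--         b = a + t
--         d = a // per_day
--         while d < n and d * per_day < b:
--             lo = a if a > d * per_day else d * per_day
--             hi = b if b < (d + 1) * per_day else (d + 1) * per_day
--             allocs[d][subject] = hi - lo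
--             d += 1
--         a = b
--
--     plan = {}
--     for d in range(1, n + 1):
--         if d == 1:
--             label = "🧠 Deep Focus"
--         elif d == days:
--             label = "🔁 Revision Focus"
--         else:
--             label = "⚖️ Balanced Learning"
--         plan[f"Day {d} ({label})"] = allocs[d - 1]
--     return plan
-- ===== Notes on version B (the rewrite author's own statement) =====
-- stated objective: faster
-- what changed: A is day-major: for every day it rescans the subject list from index 0, skipping depleted subjects; B is subject-major interval arithmetic: it concatenates the positive-minute subjects into one stream of intervals [a, a+t) and writes each subject directly into the days whose window [(d-1)*per_day, d*per_day) it overlaps, so each subject is touched once plus one entry per day.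
import Mathlib
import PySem

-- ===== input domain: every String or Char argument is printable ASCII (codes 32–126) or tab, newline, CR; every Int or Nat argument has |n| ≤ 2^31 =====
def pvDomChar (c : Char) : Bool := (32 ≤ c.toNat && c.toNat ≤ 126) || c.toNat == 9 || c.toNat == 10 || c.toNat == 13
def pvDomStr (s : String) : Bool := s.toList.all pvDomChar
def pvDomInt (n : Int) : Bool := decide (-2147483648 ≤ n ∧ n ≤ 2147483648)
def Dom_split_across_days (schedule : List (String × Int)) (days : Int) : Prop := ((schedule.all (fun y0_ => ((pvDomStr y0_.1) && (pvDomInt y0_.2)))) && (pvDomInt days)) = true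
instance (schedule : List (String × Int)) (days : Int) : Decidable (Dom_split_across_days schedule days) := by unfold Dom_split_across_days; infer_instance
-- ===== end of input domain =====

-- B replaces A's day-major rescan of the subject list by subject-major interval
-- arithmetic over the concatenated positive-minute stream (objective: faster, asymptotic).

-- the day label/key string, identical in both Pythons
def pvKey (days d : Int) : String :=
  let label := if d == 1 then "🧠 Deep Focus"
    else if d == days then "🔁 Revision Focus"
    else "⚖️ Balanced Learning"
  "Day " ++ PySem.Int.toStr d ++ " (" ++ label ++ ")"

-- ===== PORT A =====
-- inner 'for i in range(len(items))' loop of A: skips non-positive entries, allocates, breaks when remaining <= 0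
def pvInnerA (items : List (String × Int)) (i : Nat) (remaining : Int)
    (alloc : PySem.Dict String Int) : PySem.Dict String Int × List (String × Int) :=
  if h : i < items.length then
    let si := items[i]
    if si.2 ≤ 0 then
      pvInnerA items (i + 1) remaining alloc
    else
      let portion := min si.2 remaining
      let alloc' := alloc.insert si.1 portion
      let items' := items.set i (si.1, si.2 - portion)
      let remaining' := remaining - portion
      if remaining' ≤ 0 then (alloc', items')
      else pvInnerA items' (i + 1) remaining' alloc'
  else (alloc, items)
termination_by items.length - i
decreasing_by
  · omega
  · simp only [List.length_set]; omega

-- one iteration of A's 'for day in range(1, days+1)' loop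
def pvStepA (days perDay : Int)
    (st : PySem.Dict String (PySem.Dict String Int) × List (String × Int)) (day : Int) :
    PySem.Dict String (PySem.Dict String Int) × List (String × Int) :=
  let key := pvKey days day
  let plan := st.1.insert key PySem.Dict.empty      -- day_plan[key] = {}
  let res := pvInnerA st.2 0 perDay PySem.Dict.empty
  (plan.insert key res.1, res.2)

def split_across_days (schedule : List (String × Int)) (days : Int) :
    Option (List (String × List (String × Int))) :=
  if days == 0 then none
  else
    let total := (schedule.map Prod.snd).sum
    let perDay := max 1 (PySem.Int.floordiv total days)
    let res := (PySem.List.pyRange 1 (days + 1) 1).foldl (pvStepA days perDay)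
      (PySem.Dict.empty, schedule)
    some (res.1.items.map (fun p => (p.1, p.2.items)))

-- ===== PORT B =====
-- B's inner 'while d < n and d * per_day < b' loop: writes subject s (stream interval
-- [a, b)) into every day window [d*P, (d+1)*P) it overlaps
def pvAssignB (P nI b : Int) (s : String) (d a : Int)
    (allocs : List (PySem.Dict String Int)) : List (PySem.Dict String Int) :=
  if _h : d < nI ∧ d * P < b then
    pvAssignB P nI b s (d + 1) a
      (allocs.set d.toNat ((allocs.getD d.toNat PySem.Dict.empty).insert s
        ((if b < (d + 1) * P then b else (d + 1) * P) -
         (if a > d * P then a else d * P))))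
  else allocs
termination_by (nI - d).toNat
decreasing_by omega

def split_across_days_alt (schedule : List (String × Int)) (days : Int) :
    Option (List (String × List (String × Int))) :=
  if days == 0 then none
  else
    let total := (schedule.map Prod.snd).sum
    let perDay := max 1 (PySem.Int.floordiv total days)
    let nI : Int := if days > 0 then days else 0
    -- 'allocs = [{} for _ in range(n)]', then one pass over the subjects
    let st := schedule.foldl
      (fun (st : List (PySem.Dict String Int) × Int) it =>
        if it.2 ≤ 0 then st
        else (pvAssignB perDay nI (st.2 + it.2) it.1
                (PySem.Int.floordiv st.2 perDay) st.2 st.1,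
              st.2 + it.2))
      (List.replicate nI.toNat PySem.Dict.empty, 0)
    -- 'allocs[d-1]' is always in range (1 ≤ d ≤ n), so getD is exact here
    let plan := (PySem.List.pyRange 1 (nI + 1) 1).foldl
      (fun pl d => pl.insert (pvKey days d) (st.1.getD (d - 1).toNat PySem.Dict.empty))
      PySem.Dict.empty
    some (plan.items.map (fun p => (p.1, p.2.items)))

-- ===== PRECONDITION & SPEC =====
def Spec_split_across_days (schedule : List (String × Int)) (days : Int) (out : Option (List (String × List (String × Int)))) : Prop := out = split_across_days_alt schedule days
instance (schedule : List (String × Int)) (days : Int) (out : Option (List (String × List (String × Int)))) : Decidable (Spec_split_across_days schedule days out) := by unfold Spec_split_across_days; infer_instance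

-- ===== CLAIM (what is proved, stated in full; the proofs are below) =====
def Claim_equal_split_across_days : Prop := ∀ (schedule : List (String × Int)) (days : Int), Dom_split_across_days schedule days → Spec_split_across_days schedule days (split_across_days schedule days)

-- ===== LEMMAS AND PROOFS =====

def pvPos : String × Int → Bool := fun x => decide (0 < x.2)

def pvPosL (q : List (String × Int)) : Prop := ∀ x ∈ q, 0 < x.2

-- one day of the greedy on A's raw item list (zeros kept in place)
def pvGreedy (r : Int) : List (String × Int) → PySem.Dict String Int →
    PySem.Dict String Int × List (String × Int)
  | [], alloc => (alloc, [])
  | (s, t) :: tl, alloc =>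
    if t ≤ 0 then
      let res := pvGreedy r tl alloc
      (res.1, (s, t) :: res.2)
    else
      let p := min t r
      let alloc' := alloc.insert s p
      if r - p ≤ 0 then (alloc', (s, t - p) :: tl)
      else
        let res := pvGreedy (r - p) tl alloc'
        (res.1, (s, t - p) :: res.2)

-- one day of the greedy on the positive stream, emitting (subject, portion) pairs
def pvGr (r : Int) : List (String × Int) → List (String × Int) × List (String × Int)
  | [] => ([], [])
  | (s, t) :: tl =>
    if r < t then ([(s, r)], (s, t - r) :: tl)
    else if r - t ≤ 0 then ([(s, t)], tl)
    else
      let z := pvGr (r - t) tl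
      ((s, t) :: z.1, z.2)

def pvIns (m : PySem.Dict String Int) (p : String × Int) : PySem.Dict String Int :=
  m.insert p.1 p.2

lemma pvInnerA_eq (todo : List (String × Int)) :
    ∀ (done : List (String × Int)) (r : Int) (alloc : PySem.Dict String Int),
    pvInnerA (done ++ todo) done.length r alloc =
      ((pvGreedy r todo alloc).1, done ++ (pvGreedy r todo alloc).2) := by
  induction todo with
  | nil =>
    intro done r alloc
    rw [pvInnerA]
    simp [pvGreedy]
  | cons x tl ih =>
    intro done r alloc
    obtain ⟨s, t⟩ := x
    have hlt : done.length < (done ++ (s, t) :: tl).length := by simp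
    have hget : (done ++ (s, t) :: tl)[done.length] = (s, t) := by
      rw [List.getElem_append_right (Nat.le_refl _)]
      simp
    rw [pvInnerA, dif_pos hlt, pvGreedy]
    simp only [hget]
    by_cases ht : t ≤ 0
    · rw [if_pos ht, if_pos ht]
      have := ih (done ++ [(s, t)]) r alloc
      simp only [List.append_assoc, List.cons_append, List.nil_append,
        List.length_append, List.length_cons, List.length_nil] at this
      simpa using this
    · rw [if_neg ht, if_neg ht]
      have hset : (done ++ (s, t) :: tl).set done.length (s, t - min t r) =
          done ++ (s, t - min t r) :: tl := by
        rw [List.set_append_right _ _ (Nat.le_refl _)]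
        simp
      simp only [hset]
      by_cases hr : r - min t r ≤ 0
      · rw [if_pos hr, if_pos hr]
      · rw [if_neg hr, if_neg hr]
        have := ih (done ++ [(s, t - min t r)]) (r - min t r) (alloc.insert s (min t r))
        simp only [List.append_assoc, List.cons_append, List.nil_append,
          List.length_append, List.length_cons, List.length_nil] at this
        simpa using this

lemma pvGreedy_eq_gr (todo : List (String × Int)) :
    ∀ (r : Int) (alloc : PySem.Dict String Int), 0 < r →
    (pvGreedy r todo alloc).1 = (pvGr r (todo.filter pvPos)).1.foldl pvIns alloc ∧
    (pvGreedy r todo alloc).2.filter pvPos = (pvGr r (todo.filter pvPos)).2 := by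
  induction todo with
  | nil => intro r alloc _; simp [pvGreedy, pvGr]
  | cons x tl ih =>
    intro r alloc hr
    obtain ⟨s, t⟩ := x
    by_cases ht : t ≤ 0
    · have hflt : ((s, t) :: tl).filter pvPos = tl.filter pvPos := by
        simp [pvPos, not_lt.mpr ht]
      rw [pvGreedy, if_pos ht, hflt]
      have := ih r alloc hr
      constructor
      · exact this.1
      · simpa [pvPos, not_lt.mpr ht] using this.2
    · have ht' : 0 < t := by omega
      have hflt : ((s, t) :: tl).filter pvPos = (s, t) :: tl.filter pvPos := by
        simp [pvPos, ht']
      rw [pvGreedy, if_neg ht, hflt, pvGr]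
      by_cases hrt : r < t
      · have hm : min t r = r := min_eq_right (le_of_lt hrt)
        rw [if_pos hrt]
        simp only [hm, if_pos (by omega : r - r ≤ 0)]
        refine ⟨rfl, ?_⟩
        simp [pvPos, hrt]
      · rw [if_neg hrt]
        have hm : min t r = t := min_eq_left (by omega)
        by_cases hstop : r - t ≤ 0
        · simp only [hm, if_pos hstop]
          refine ⟨rfl, ?_⟩
          simp [pvPos]
        · simp only [hm, if_neg hstop]
          have := ih (r - t) (alloc.insert s t) (by omega)
          refine ⟨?_, ?_⟩
          · simpa [pvIns] using this.1
          · simpa [pvPos] using this.2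

-- the subject-major spec: pairs a day window [w, w+P) receives from the stream q
-- when q's first item starts at offset a
def pvOv (P : Int) : Int → Int → List (String × Int) → List (String × Int)
  | _, _, [] => []
  | w, a, (s, t) :: q =>
    (if w < a + t ∧ a < w + P then [(s, min (a + t) (w + P) - max a w)] else []) ++
      pvOv P w (a + t) q

lemma pvOv_nil_of_le (P : Int) (q : List (String × Int)) :
    ∀ (w a : Int), pvPosL q → w + P ≤ a → pvOv P w a q = [] := by
  induction q with
  | nil => intro w a _ _; rfl
  | cons x q ih =>
    intro w a hq ha
    obtain ⟨s, t⟩ := x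
    have ht : 0 < t := hq (s, t) (by simp)
    rw [pvOv, if_neg (by omega)]
    have := ih w (a + t) (fun y hy => hq y (by simp [hy])) (by omega)
    simpa using this

lemma pvOv_shift (P : Int) (q : List (String × Int)) :
    ∀ (w a c : Int), pvOv P (w + c) (a + c) q = pvOv P w a q := by
  induction q with
  | nil => intro w a c; rfl
  | cons x q ih =>
    intro w a c
    obtain ⟨s, t⟩ := x
    rw [pvOv, pvOv]
    have hrec : a + c + t = a + t + c := by ring
    rw [hrec, ih w (a + t) c]
    congr 1
    by_cases h : w < a + t ∧ a < w + P
    · rw [if_pos (by omega : w + c < a + t + c ∧ a + c < w + c + P), if_pos h]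
      have hpt : min (a + t + c) (w + c + P) - max (a + c) (w + c) =
          min (a + t) (w + P) - max a w := by omega
      rw [hpt]
    · rw [if_neg (by omega : ¬(w + c < a + t + c ∧ a + c < w + c + P)), if_neg h]

lemma pvGr_pos (q : List (String × Int)) :
    ∀ (r : Int), pvPosL q → pvPosL (pvGr r q).2 := by
  induction q with
  | nil => intro r _ x hx; simp [pvGr] at hx
  | cons y tl ih =>
    intro r hq
    obtain ⟨s, t⟩ := y
    have ht : 0 < t := hq (s, t) (by simp)
    have htl : pvPosL tl := fun y hy => hq y (by simp [hy])
    intro x hx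
    rw [pvGr] at hx
    split at hx
    · rename_i hrt
      simp only at hx
      rcases List.mem_cons.mp hx with h | h
      · subst h; simpa using by omega
      · exact htl x h
    · split at hx
      · exact htl x hx
      · exact ih (r - t) htl x hx

lemma pvGr_pairs (P : Int) (q : List (String × Int)) :
    ∀ r, 0 < r → r ≤ P → pvPosL q → (pvGr r q).1 = pvOv P 0 (P - r) q := by
  induction q with
  | nil => intro r _ _ _; rfl
  | cons x tl ih =>
    intro r hr hrP hq
    obtain ⟨s, t⟩ := x
    have ht : 0 < t := hq (s, t) (by simp)
    have htl : pvPosL tl := fun y hy => hq y (by simp [hy])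
    rw [pvGr, pvOv, if_pos (by omega : 0 < P - r + t ∧ P - r < 0 + P)]
    have hport : min (P - r + t) (0 + P) - max (P - r) 0 = min t r := by omega
    rw [hport]
    by_cases hrt : r < t
    · rw [if_pos hrt, pvOv_nil_of_le P tl 0 (P - r + t) htl (by omega)]
      simp [min_eq_right (le_of_lt hrt)]
    · rw [if_neg hrt]
      by_cases hstop : r - t ≤ 0
      · rw [if_pos hstop, pvOv_nil_of_le P tl 0 (P - r + t) htl (by omega)]
        simp [min_eq_left (by omega : t ≤ r)]
      · rw [if_neg hstop]
        have := ih (r - t) (by omega) (by omega) htl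
        have ha : P - r + t = P - (r - t) := by ring
        rw [ha]
        simp [min_eq_left (by omega : t ≤ r), this]

lemma pvGr_shift (P : Int) (q : List (String × Int)) :
    ∀ (w r : Int), 0 ≤ w → 0 < r → r ≤ P → pvPosL q →
    pvOv P (w + P) (P - r) q = pvOv P w 0 (pvGr r q).2 := by
  induction q with
  | nil => intro w r _ _ _ _; rfl
  | cons x tl ih =>
    intro w r hw hr hrP hq
    obtain ⟨s, t⟩ := x
    have ht : 0 < t := hq (s, t) (by simp)
    have htl : pvPosL tl := fun y hy => hq y (by simp [hy])
    rw [pvGr, pvOv]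
    by_cases hrt : r < t
    · rw [if_pos hrt, pvOv]
      have ha : P - r + t = (t - r) + P := by ring
      by_cases hov : w < t - r
      · rw [if_pos (by omega : w + P < P - r + t ∧ P - r < w + P + P),
            if_pos (by omega : w < 0 + (t - r) ∧ (0:Int) < w + P)]
        have hport : min (P - r + t) (w + P + P) - max (P - r) (w + P) =
            min (0 + (t - r)) (w + P) - max 0 w := by omega
        rw [hport, ha, pvOv_shift P tl w (t - r) P]
        simp
      · rw [if_neg (by omega : ¬(w + P < P - r + t ∧ P - r < w + P + P)),
            if_neg (by omega : ¬(w < 0 + (t - r) ∧ (0:Int) < w + P))]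
        rw [ha, pvOv_shift P tl w (t - r) P]
        simp
    · rw [if_neg hrt]
      by_cases hstop : r - t ≤ 0
      · rw [if_pos hstop, if_neg (by omega : ¬(w + P < P - r + t ∧ P - r < w + P + P))]
        have ha : P - r + t = 0 + P := by omega
        rw [ha, pvOv_shift P tl w 0 P]
        simp
      · rw [if_neg hstop, if_neg (by omega : ¬(w + P < P - r + t ∧ P - r < w + P + P))]
        have ha : P - r + t = P - (r - t) := by ring
        rw [ha]
        have := ih w (r - t) hw (by omega) (by omega) htl
        simpa using this

-- day-major iterate of pvGr
def pvAdv (P : Int) : Nat → List (String × Int) → List (String × Int)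
  | 0, q => q
  | j + 1, q => (pvGr P (pvAdv P j q)).2

lemma pvAdv_pos (P : Int) (j : Nat) (q : List (String × Int)) (hq : pvPosL q) :
    pvPosL (pvAdv P j q) := by
  induction j with
  | zero => exact hq
  | succ j ih => exact pvGr_pos _ P ih

lemma pvOv_adv (P : Int) (hP : 1 ≤ P) (q : List (String × Int)) (hq : pvPosL q) :
    ∀ (j : Nat) (w : Int), 0 ≤ w →
    pvOv P (w + (j : Int) * P) 0 q = pvOv P w 0 (pvAdv P j q) := by
  intro j
  induction j with
  | zero => intro w _; simp [pvAdv]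
  | succ j ih =>
    intro w hw
    have h1 : w + ((j : Int) + 1) * P = (w + P) + (j : Int) * P := by ring
    push_cast
    rw [h1, ih (w + P) (by omega)]
    have h2 : (0 : Int) = P - P := by ring
    rw [show pvOv P (w + P) 0 (pvAdv P j q) = pvOv P (w + P) (P - P) (pvAdv P j q) by rw [← h2]]
    exact pvGr_shift P (pvAdv P j q) w P hw (by omega) le_rfl (pvAdv_pos P j q hq)

def pvDictOf (ps : List (String × Int)) : PySem.Dict String Int :=
  ps.foldl pvIns PySem.Dict.empty

-- A-side: the day fold equals the mid-level pvGr fold on the filtered stream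
def pvStepM (days P : Int)
    (st : PySem.Dict String (PySem.Dict String Int) × List (String × Int)) (d : Int) :
    PySem.Dict String (PySem.Dict String Int) × List (String × Int) :=
  (st.1.insert (pvKey days d) (pvDictOf (pvGr P st.2).1), (pvGr P st.2).2)

lemma pvFoldA_mid (days P : Int) (hP : 0 < P) (L : List Int) :
    ∀ plan (items : List (String × Int)),
    L.foldl (pvStepM days P) (plan, items.filter pvPos) =
      ((L.foldl (pvStepA days P) (plan, items)).1,
       (L.foldl (pvStepA days P) (plan, items)).2.filter pvPos) := by
  induction L with
  | nil => intro plan items; simp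
  | cons d L ih =>
    intro plan items
    simp only [List.foldl_cons]
    have hstep : pvStepM days P (plan, items.filter pvPos) d =
        ((pvStepA days P (plan, items) d).1,
         (pvStepA days P (plan, items) d).2.filter pvPos) := by
      unfold pvStepA pvStepM
      have hA := pvInnerA_eq items [] P PySem.Dict.empty
      simp only [List.nil_append, List.length_nil] at hA
      have hB := pvGreedy_eq_gr items P PySem.Dict.empty hP
      simp only [hA, hB.1, hB.2, PySem.Dict.insert_insert_self]
      rfl
    rw [hstep]
    exact ih _ _

lemma pvFoldA_spec (days P : Int) (hP : 1 ≤ P) (m : Nat)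
    (q : List (String × Int)) (hq : pvPosL q) :
    ∀ plan,
    (PySem.List.pyRange 1 ((m : Int) + 1) 1).foldl (pvStepM days P) (plan, q) =
      ((PySem.List.pyRange 1 ((m : Int) + 1) 1).foldl
        (fun pl d => pl.insert (pvKey days d) (pvDictOf (pvOv P ((d - 1) * P) 0 q))) plan,
       pvAdv P m q) := by
  induction m with
  | zero =>
    intro plan
    rw [PySem.List.pyRange_one_eq_nil (by omega)]
    rfl
  | succ m ih =>
    intro plan
    have hsplit : PySem.List.pyRange 1 ((↑(m + 1) : Int) + 1) 1 =
        PySem.List.pyRange 1 ((m : Int) + 1) 1 ++ [(m : Int) + 1] := by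
      push_cast
      exact PySem.List.pyRange_one_succ_right (by omega)
    rw [hsplit, List.foldl_append, List.foldl_append, ih plan]
    simp only [List.foldl_cons, List.foldl_nil]
    unfold pvStepM
    have hpairs : (pvGr P (pvAdv P m q)).1 = pvOv P (((m : Int) + 1 - 1) * P) 0 q := by
      rw [pvGr_pairs P (pvAdv P m q) P (by omega) le_rfl (pvAdv_pos P m q hq)]
      have : P - P = (0 : Int) := by ring
      rw [this]
      have := pvOv_adv P hP q hq m 0 le_rfl
      simp only [zero_add] at this
      rw [← this]
      congr 1
      ring
    rw [hpairs]
    rfl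

-- B-side: the pvAssignB loop, read through getD
lemma pvAssignB_length (P nI b : Int) (s : String) :
    ∀ (d a : Int) (allocs : List (PySem.Dict String Int)),
      (pvAssignB P nI b s d a allocs).length = allocs.length := by
  intro d
  have hm : ∀ (k : Nat) (d a : Int) (allocs : List (PySem.Dict String Int)),
      (nI - d).toNat ≤ k → (pvAssignB P nI b s d a allocs).length = allocs.length := by
    intro k
    induction k with
    | zero =>
      intro d a allocs hk
      rw [pvAssignB]
      rw [dif_neg (by omega)]
    | succ k ih =>
      intro d a allocs hk
      rw [pvAssignB]
      split
      · rename_i h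
        rw [ih (d + 1) a _ (by omega)]
        simp
      · rfl
  intro a allocs
  exact hm (nI - d).toNat d a allocs le_rfl

lemma pvAssignB_getD (P nI b : Int) (hP : 1 ≤ P) (s : String) (a : Int) :
    ∀ (d : Int), 0 ≤ d → ∀ (allocs : List (PySem.Dict String Int)),
      allocs.length = nI.toNat → ∀ (e : Nat),
    (pvAssignB P nI b s d a allocs).getD e PySem.Dict.empty =
      if d ≤ (e : Int) ∧ (e : Int) < nI ∧ (e : Int) * P < b then
        (allocs.getD e PySem.Dict.empty).insert s
          ((if b < ((e : Int) + 1) * P then b else ((e : Int) + 1) * P) -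
           (if a > (e : Int) * P then a else (e : Int) * P))
      else allocs.getD e PySem.Dict.empty := by
  have main : ∀ (k : Nat) (d : Int), 0 ≤ d → (nI - d).toNat ≤ k →
      ∀ (allocs : List (PySem.Dict String Int)), allocs.length = nI.toNat → ∀ (e : Nat),
      (pvAssignB P nI b s d a allocs).getD e PySem.Dict.empty =
        if d ≤ (e : Int) ∧ (e : Int) < nI ∧ (e : Int) * P < b then
          (allocs.getD e PySem.Dict.empty).insert s
            ((if b < ((e : Int) + 1) * P then b else ((e : Int) + 1) * P) -
             (if a > (e : Int) * P then a else (e : Int) * P))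
        else allocs.getD e PySem.Dict.empty := by
    intro k
    induction k with
    | zero =>
      intro d hd hk allocs hlen e
      rw [pvAssignB, dif_neg (by omega), if_neg (by omega)]
    | succ k ih =>
      intro d hd hk allocs hlen e
      rw [pvAssignB]
      by_cases h : d < nI ∧ d * P < b
      · rw [dif_pos h]
        set v := (allocs.getD d.toNat PySem.Dict.empty).insert s
          ((if b < (d + 1) * P then b else (d + 1) * P) -
           (if a > d * P then a else d * P)) with hv
        have hlen' : (allocs.set d.toNat v).length = nI.toNat := by
          simp [hlen]
        rw [ih (d + 1) (by omega) (by omega) _ hlen' e]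
        have hdlt : d.toNat < allocs.length := by omega
        have hgset : (allocs.set d.toNat v).getD e PySem.Dict.empty =
            if e = d.toNat then v else allocs.getD e PySem.Dict.empty := by
          by_cases he : e = d.toNat
          · subst he
            simp [List.getD_eq_getElem?_getD, hdlt]
          · have hne2 : d.toNat ≠ e := fun hc => he hc.symm
            simp [List.getD_eq_getElem?_getD, hne2, he]
        by_cases he : e = d.toNat
        · subst he
          simp only [Int.toNat_of_nonneg hd]
          rw [hgset, if_pos rfl,
            if_neg (show ¬(d + 1 ≤ d ∧ d < nI ∧ d * P < b) by omega),
            if_pos (show d ≤ d ∧ d < nI ∧ d * P < b from ⟨le_refl d, h.1, h.2⟩)]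
        · rw [hgset, if_neg he]
          have hiff : (d + 1 ≤ (e : Int) ∧ (e : Int) < nI ∧ (e : Int) * P < b) ↔
              (d ≤ (e : Int) ∧ (e : Int) < nI ∧ (e : Int) * P < b) := by omega
          rw [if_congr hiff rfl rfl]
      · rw [dif_neg h, if_neg ?_]
        intro ⟨h1, h2, h3⟩
        apply h
        refine ⟨lt_of_le_of_lt h1 h2, ?_⟩
        calc d * P ≤ (e : Int) * P := by
              exact mul_le_mul_of_nonneg_right h1 (by omega)
          _ < b := h3
  intro d hd allocs hlen e
  exact main (nI - d).toNat d hd le_rfl allocs hlen e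

-- B-side: one pass over the schedule builds, per day e, exactly the spec pairs
lemma pvFoldB_spec (P nI : Int) (hP : 1 ≤ P) (sched : List (String × Int)) :
    ∀ (al : List (PySem.Dict String Int)) (a : Int), 0 ≤ a → al.length = nI.toNat →
    (sched.foldl
      (fun (st : List (PySem.Dict String Int) × Int) it =>
        if it.2 ≤ 0 then st
        else (pvAssignB P nI (st.2 + it.2) it.1 (PySem.Int.floordiv st.2 P) st.2 st.1,
              st.2 + it.2))
      (al, a)).1.length = nI.toNat ∧
    ∀ (e : Nat), (e : Int) < nI →
    ((sched.foldl
      (fun (st : List (PySem.Dict String Int) × Int) it =>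
        if it.2 ≤ 0 then st
        else (pvAssignB P nI (st.2 + it.2) it.1 (PySem.Int.floordiv st.2 P) st.2 st.1,
              st.2 + it.2))
      (al, a)).1.getD e PySem.Dict.empty) =
      (pvOv P ((e : Int) * P) a (sched.filter pvPos)).foldl pvIns
        (al.getD e PySem.Dict.empty) := by
  induction sched with
  | nil =>
    intro al a _ hlen
    exact ⟨hlen, fun e _ => by simp [pvOv]⟩
  | cons x rest ih =>
    intro al a ha hlen
    obtain ⟨s, t⟩ := x
    by_cases ht : t ≤ 0
    · have hflt : ((s, t) :: rest).filter pvPos = rest.filter pvPos := by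
        simp [pvPos, not_lt.mpr ht]
      simp only [List.foldl_cons, if_pos ht, hflt]
      exact ih al a ha hlen
    · have hflt : ((s, t) :: rest).filter pvPos = (s, t) :: rest.filter pvPos := by
        simp [pvPos, (by omega : 0 < t)]
      have hd0 : 0 ≤ PySem.Int.floordiv a P := by
        rw [PySem.Int.floordiv_eq_ediv_of_pos (by omega : (0:Int) < P)]
        exact Int.ediv_nonneg ha (by omega)
      have hlen' : (pvAssignB P nI (a + t) s (PySem.Int.floordiv a P) a al).length
          = nI.toNat := by
        rw [pvAssignB_length]; exact hlen
      have IH := ih (pvAssignB P nI (a + t) s (PySem.Int.floordiv a P) a al) (a + t)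
        (by omega) hlen'
      simp only [List.foldl_cons, if_neg ht, hflt]
      refine ⟨IH.1, ?_⟩
      intro e he
      rw [IH.2 e he, pvOv, List.foldl_append]
      congr 1
      have hassign := (pvAssignB_getD P nI (a + t) hP s a) (PySem.Int.floordiv a P)
        hd0 al hlen e
      have hE : ((e : Int) + 1) * P = (e : Int) * P + P := by ring
      have hbr : (PySem.Int.floordiv a P ≤ (e : Int)) ↔ a < (e : Int) * P + P := by
        have h1 : ((e : Int) + 1 ≤ PySem.Int.floordiv a P) ↔ ((e : Int) + 1) * P ≤ a :=
          PySem.Int.le_floordiv_iff_mul_le (by omega : (0:Int) < P)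
        rw [hE] at h1
        omega
      have hcond : (PySem.Int.floordiv a P ≤ (e : Int) ∧ (e : Int) < nI ∧
          (e : Int) * P < a + t) ↔
          ((e : Int) * P < a + t ∧ a < (e : Int) * P + P) := by
        constructor
        · intro hx; exact ⟨hx.2.2, hbr.mp hx.1⟩
        · intro hx; exact ⟨hbr.mpr hx.2, he, hx.1⟩
      have hmin : (if a + t < ((e : Int) + 1) * P then a + t else ((e : Int) + 1) * P)
          = min (a + t) ((e : Int) * P + P) := by
        rw [hE]; split_ifs <;> omega
      have hmax : (if a > (e : Int) * P then a else (e : Int) * P)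
          = max a ((e : Int) * P) := by
        split_ifs <;> omega
      rw [hassign, if_congr hcond rfl rfl, hmin, hmax]
      split_ifs with hc
      · simp [pvIns]
      · simp

-- ===== VERDICT (by name: the statement is the Claim_ definition above) =====
theorem split_across_days_spec : Claim_equal_split_across_days := by
  intro schedule days _
  unfold Spec_split_across_days split_across_days split_across_days_alt
  by_cases h0 : days == 0
  · simp [h0]
  · simp only [h0, Bool.false_eq_true, if_false]
    have hP : (1 : Int) ≤ max 1 (PySem.Int.floordiv ((schedule.map Prod.snd).sum) days) :=
      le_max_left _ _
    set P := max 1 (PySem.Int.floordiv ((schedule.map Prod.snd).sum) days) with hPdef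
    set nI : Int := if days > 0 then days else 0 with hnIdef
    have hnI0 : 0 ≤ nI := by rw [hnIdef]; split <;> omega
    set m := nI.toNat with hmdef
    have hmc : (m : Int) = nI := Int.toNat_of_nonneg hnI0
    have hq : pvPosL (schedule.filter pvPos) := by
      intro x hx
      have := List.of_mem_filter hx
      simpa [pvPos] using this
    have hR : PySem.List.pyRange 1 (days + 1) 1 = PySem.List.pyRange 1 ((m : Int) + 1) 1 := by
      rw [hmc, hnIdef]
      split
      · rfl
      · rw [PySem.List.pyRange_one_eq_nil (by omega),
          PySem.List.pyRange_one_eq_nil (by omega)]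
    have hA1 := pvFoldA_mid days P (by omega) (PySem.List.pyRange 1 ((m : Int) + 1) 1)
      PySem.Dict.empty schedule
    have hA2 := pvFoldA_spec days P hP m (schedule.filter pvPos) hq PySem.Dict.empty
    have hrepl : (List.replicate nI.toNat (PySem.Dict.empty : PySem.Dict String Int)).length
        = nI.toNat := by simp
    have hB := pvFoldB_spec P nI hP schedule
      (List.replicate nI.toNat PySem.Dict.empty) 0 le_rfl hrepl
    have hplan :
        ((PySem.List.pyRange 1 (days + 1) 1).foldl (pvStepA days P)
          (PySem.Dict.empty, schedule)).1 =
        (PySem.List.pyRange 1 (nI + 1) 1).foldl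
          (fun pl d => pl.insert (pvKey days d)
            ((schedule.foldl
              (fun (st : List (PySem.Dict String Int) × Int) it =>
                if it.2 ≤ 0 then st
                else (pvAssignB P nI (st.2 + it.2) it.1
                        (PySem.Int.floordiv st.2 P) st.2 st.1,
                      st.2 + it.2))
              (List.replicate nI.toNat PySem.Dict.empty, 0)).1.getD (d - 1).toNat
              PySem.Dict.empty))
          PySem.Dict.empty := by
      rw [hmc] at hR hA1 hA2
      have hA1' := congrArg Prod.fst hA1
      dsimp only at hA1'
      rw [hR, ← hA1', hA2]
      dsimp only
      apply PySem.List.foldl_congr_mem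
      intro acc d hd
      have hdr := (PySem.List.mem_pyRange_one).mp hd
      have hec : (((d - 1).toNat : Nat) : Int) = d - 1 := by omega
      have helt : ((d - 1).toNat : Int) < nI := by omega
      rw [hB.2 (d - 1).toNat helt]
      have hbase : (List.replicate nI.toNat
          (PySem.Dict.empty : PySem.Dict String Int)).getD (d - 1).toNat
          PySem.Dict.empty = PySem.Dict.empty := by
        simp [List.getD_eq_getElem?_getD, List.getElem?_replicate]
        split <;> rfl
      rw [hbase, hec]
      rfl
    rw [hplan]
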